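-- pv_equiv track=rewrite | github.com/suchot/CS-Notes | docs/offer/贝壳/c.py | eatsuger
-- ===== SOURCE A (Python) =====
-- def eatsuger(w):
--     dp = [0]*(10**6+1)
--     for index in w:
--         if dp[index]==0:
--             dp[index]+=1
--         elif dp[index]==1:
--             dp[index]=0
--             while dp[index+1]==1:
--                 dp[index]=0
--                 index+=1
--             dp[index]=1
--
--
--     res = sum(dp)
--     return res
-- ===== SOURCE B (Python) =====
-- def eatsuger(w):
--     n = 0
--     for index in w:
--         if (n >> index) & 1 == 0:
--             n |= 1 << index
--         else:
--             m = n >> index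
--             t = (m ^ (m + 1)).bit_length() - 1   # length of the run of ones starting at bit `index`
--             j = index + t - 1                    # A's carry walk stops at the run's top bit
--             n = ((n >> j) << j) | (n & ((1 << index) - 1))
--     return bin(n).count("1")
-- ===== Notes on version B (the rewrite author's own statement) =====
-- stated objective: alternative
-- what changed: B replaces A's 10^6-slot dp array, element-wise carry-walk while loop and full-array final sum by one big integer whose bits are the dp array: a collision collapses the whole run of ones with three word-parallel shift/mask operations computed from bit_length, and the result is the integer's popcount, so nothing ever allocates or scans 10^6 cells.
-- outside the precondition, e.g. on eatsuger([-1]): A returns 1, B raises ValueError; on eatsuger([999999, 999999, 1000000]): A returns 2, B returns 2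
import Mathlib
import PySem

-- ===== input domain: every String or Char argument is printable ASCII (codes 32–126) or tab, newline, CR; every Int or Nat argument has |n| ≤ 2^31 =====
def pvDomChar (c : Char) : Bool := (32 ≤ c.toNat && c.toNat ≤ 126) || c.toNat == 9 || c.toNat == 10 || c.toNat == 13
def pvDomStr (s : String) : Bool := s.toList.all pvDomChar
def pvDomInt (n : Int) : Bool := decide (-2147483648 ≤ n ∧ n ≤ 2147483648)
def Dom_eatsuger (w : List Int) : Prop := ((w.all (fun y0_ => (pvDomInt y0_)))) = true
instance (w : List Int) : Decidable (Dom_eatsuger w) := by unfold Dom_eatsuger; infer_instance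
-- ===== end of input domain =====

-- B replaces A's 10^6-slot dp array, per-cell carry-walk and full-array final sum by bit-parallel
-- big-integer shift/mask operations plus a popcount (objective: alternative algorithm, no 10^6-cell array).

-- ===== PORT A =====
-- while dp[index+1]==1: dp[index]=0; index+=1
-- (fuel = len(dp) bounds the walk; under Pre_ the loop always exits before the fuel does)
def eatLoop : Nat → List Int → Int → List Int × Int
  | 0, dp, index => (dp, index)
  | f + 1, dp, index =>
      if PySem.List.pyGetD dp (index + 1) 0 = 1 then
        eatLoop f (PySem.List.pySetD dp index 0) (index + 1)
      else (dp, index)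

def eatStep (dp : List Int) (index : Int) : List Int :=
  if PySem.List.pyGetD dp index 0 = 0 then
    PySem.List.pySetD dp index (PySem.List.pyGetD dp index 0 + 1)
  else if PySem.List.pyGetD dp index 0 = 1 then
    let p := eatLoop (10 ^ 6 + 1) (PySem.List.pySetD dp index 0) index
    PySem.List.pySetD p.1 p.2 1
  else dp

-- Python's sum(dp) is a left fold over the list
def eatsuger (w : List Int) : Int :=
  (w.foldl eatStep (List.replicate (10 ^ 6 + 1) 0)).foldl (· + ·) 0

-- ===== PORT B =====
-- bin(n).count("1") is n.bit_count() for n ≥ 0 (n is a bitwise-or accumulator, always ≥ 0) → PySem.Int.bitCount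
def eatStepB (n : Int) (index : Int) : Int :=
  if index < 0 then n   -- Python `n >> index` raises ValueError here; such inputs are outside Pre_
  else
    let i := index.toNat
    if PySem.Int.band (n >>> i) 1 = 0 then
      PySem.Int.bor n (1 <<< i)
    else
      let m := n >>> i
      let t := PySem.Int.bitLength (PySem.Int.bxor m (m + 1)) - 1
      let j := i + (t - 1)
      PySem.Int.bor ((n >>> j) <<< j) (PySem.Int.band n ((1 <<< i) - 1))

-- bin(n).count("1") is the popcount of n (the accumulator n is a bitwise-or/mask value, always ≥ 0);
-- computed by divide-and-conquer on the bits so it evaluates on very wide integers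
-- (exact: popDC equals n.bit_count() for n ≥ 0, proved in popDC_eq_bitCount below)
def popDC : Nat → Nat → Nat
  | 0, n => n % 2
  | f + 1, n =>
      if n ≤ 1 then n
      else popDC f (n >>> ((n.log2 + 1) / 2)) + popDC f (n &&& ((1 <<< ((n.log2 + 1) / 2)) - 1))

def eatsuger_alt (w : List Int) : Int :=
  ((popDC (((w.foldl eatStepB 0).toNat.log2) + 1) (w.foldl eatStepB 0).toNat : Nat) : Int)

-- ===== PRECONDITION & SPEC =====
-- Pre_ excludes (a) negative elements — there A RETURNS an accidental value via Python's
-- negative-index wraparound into the top of the dp array, while B's own `n >> index` raises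
-- ValueError, so B cannot return anything there — and (b) inputs holding a duplicated value i
-- together with every value from i to 10^6 (pvChainTop): exactly there A's carry walk can run off
-- the top of dp and raise IndexError (every raising input is of this shape); this closed-form
-- condition also drops a few order-dependent inputs of the same shape on which A still returns
-- (and B returns the same value), cited in claim.json. "i is duplicated and all of [i, 10^6]
-- occurs in w" is phrased as: count i ≥ 2 and the number of distinct values ≥ i equals 10^6+1-i.
def Pre_eatsuger (w : List Int) : Prop :=
  (∀ x ∈ w, 0 ≤ x ∧ x ≤ 10 ^ 6) ∧
    ¬ ∃ i ∈ w, 2 ≤ w.count i ∧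
      (((w.filter (fun y => decide (i ≤ y))).dedup.length : Int) = 10 ^ 6 + 1 - i)
instance (w : List Int) : Decidable (Pre_eatsuger w) := by unfold Pre_eatsuger; infer_instance

def pvWitness_eatsuger : List Int := [0, 2, 1, 1, 0]

def Spec_eatsuger (w : List Int) (out : Int) : Prop := out = eatsuger_alt w
instance (w : List Int) (out : Int) : Decidable (Spec_eatsuger w out) := by unfold Spec_eatsuger; infer_instance

-- ===== CLAIM (what is proved, stated in full; the proofs are below) =====
def Claim_equal_eatsuger : Prop := ∀ (w : List Int), Dom_eatsuger w → Pre_eatsuger w → Spec_eatsuger w (eatsuger w)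

-- ===== LEMMAS AND PROOFS =====

-- dp as the bit vector of a natural number n, and the guarantee that no bit > 10^6 is set
def bitL (n : Nat) : List Int := (List.range (10 ^ 6 + 1)).map (fun k => if n.testBit k then 1 else 0)
def GoodN (n : Nat) : Prop := ∀ k, n.testBit k = true → k < 10 ^ 6 + 1
def clearFrom (dp : List Int) (i t : Nat) : List Int :=
  (List.range t).foldl (fun d s => d.set (i + s) 0) dp

theorem length_bitL (n : Nat) : (bitL n).length = 10 ^ 6 + 1 := by simp [bitL]

theorem getElem?_set_form (l : List Int) (i : Nat) (a : Int) (j : Nat) :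
    (l.set i a)[j]? = if i = j ∧ i < l.length then some a else l[j]? := by
  rw [List.getElem?_set']
  by_cases h : i = j
  · subst h
    by_cases hl : i < l.length
    · rw [List.getElem?_eq_getElem hl]
      simp [hl]
    · rw [List.getElem?_eq_none (by omega)]
      simp [hl]
  · simp [h]

theorem getElem?_bitL (n k : Nat) :
    (bitL n)[k]? = if k < 10 ^ 6 + 1 then some (if n.testBit k then (1 : Int) else 0) else none := by
  by_cases hk : k < 10 ^ 6 + 1
  · have hk' : k < ((List.range (10 ^ 6 + 1)).map
        (fun k => if n.testBit k then (1 : Int) else 0)).length := by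
      simp; omega
    rw [bitL, List.getElem?_eq_getElem hk']
    simp [hk]
    all_goals omega
  · rw [bitL, List.getElem?_eq_none (by simp; omega)]
    simp [hk]
    all_goals omega

theorem clearFrom_length (t : Nat) (dp : List Int) (i : Nat) :
    (clearFrom dp i t).length = dp.length := by
  induction t with
  | zero => simp [clearFrom]
  | succ t ih =>
      simp only [clearFrom, List.range_succ, List.foldl_append, List.foldl_cons, List.foldl_nil]
      simpa [clearFrom] using ih

theorem clearFrom_getElem? (t : Nat) (dp : List Int) (i k : Nat) :
    (clearFrom dp i t)[k]? =
      if i ≤ k ∧ k < i + t then (if k < dp.length then some 0 else none) else dp[k]? := by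
  induction t with
  | zero => simp [clearFrom]
  | succ t ih =>
      have hstep : clearFrom dp i (t + 1) = (clearFrom dp i t).set (i + t) 0 := by
        simp [clearFrom, List.range_succ]
      rw [hstep, getElem?_set_form, clearFrom_length, ih]
      by_cases hk : i + t = k ∧ i + t < dp.length
      · have c1 : i ≤ k ∧ k < i + (t + 1) := by omega
        have c2 : k < dp.length := by omega
        rw [if_pos hk, if_pos c1, if_pos c2]
      · rw [if_neg hk]
        by_cases h1 : i ≤ k ∧ k < i + t
        · have c : i ≤ k ∧ k < i + (t + 1) := by omega
          rw [if_pos h1, if_pos c]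
        · rw [if_neg h1]
          by_cases h2 : i ≤ k ∧ k < i + (t + 1)
          · have hkk : k = i + t := by omega
            have hlen : ¬ k < dp.length := by omega
            rw [if_pos h2, if_neg hlen, List.getElem?_eq_none (by omega)]
          · rw [if_neg h2]

theorem clearFrom_shift (dp : List Int) (i t : Nat) :
    clearFrom dp i (t + 1) = clearFrom (dp.set i 0) (i + 1) t := by
  simp only [clearFrom, List.range_succ_eq_map, List.foldl_cons, List.foldl_map, Nat.add_zero]
  congr 1
  funext d s
  congr 1
  omega

-- characterisation of A's while loop on a run of ones
theorem loop_spec (t : Nat) : ∀ (fuel : Nat) (dp : List Int) (i : Nat), t < fuel →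
    (∀ k, k < t → PySem.List.pyGetD dp ((i : Int) + 1 + (k : Int)) 0 = 1) →
    PySem.List.pyGetD dp ((i : Int) + 1 + (t : Int)) 0 ≠ 1 →
    eatLoop fuel dp (i : Int) = (clearFrom dp i t, ((i + t : Nat) : Int)) := by
  induction t with
  | zero =>
      intro fuel dp i hf h1 h2
      obtain ⟨f, rfl⟩ : ∃ f, fuel = f + 1 := ⟨fuel - 1, by omega⟩
      rw [eatLoop]
      have hc : ¬ PySem.List.pyGetD dp ((i : Int) + 1) 0 = 1 := by simpa using h2
      simp [hc, clearFrom]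
  | succ t ih =>
      intro fuel dp i hf h1 h2
      obtain ⟨f, rfl⟩ : ∃ f, fuel = f + 1 := ⟨fuel - 1, by omega⟩
      rw [eatLoop]
      have hhd : PySem.List.pyGetD dp ((i : Int) + 1) 0 = 1 := by
        simpa using h1 0 (Nat.succ_pos t)
      rw [if_pos hhd]
      have hcast : ((i : Int) + 1) = ((i + 1 : Nat) : Int) := by push_cast; ring
      have hset : PySem.List.pySetD dp (i : Int) 0 = dp.set i 0 := by simp
      have hrec : eatLoop f (dp.set i 0) (((i + 1 : Nat)) : Int) =
          (clearFrom (dp.set i 0) (i + 1) t, ((i + 1 + t : Nat) : Int)) := by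
        apply ih f (dp.set i 0) (i + 1) (by omega)
        · intro k hk
          have hold := h1 (k + 1) (by omega)
          have e1 : (((i + 1 : Nat) : Int) + 1 + (k : Int)) = (((i + 1 + 1 + k : Nat)) : Int) := by
            push_cast; ring
          have e2 : ((i : Int) + 1 + ((k + 1 : Nat) : Int)) = (((i + 1 + 1 + k : Nat)) : Int) := by
            push_cast; ring
          rw [e1]
          rw [e2] at hold
          rw [PySem.List.pyGetD_natCast] at hold ⊢
          rw [List.getD_eq_getElem?_getD] at hold ⊢
          rw [List.getElem?_set_ne (by omega)]
          exact hold
        · have e1 : (((i + 1 : Nat) : Int) + 1 + (t : Int)) = (((i + 1 + 1 + t : Nat)) : Int) := by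
            push_cast; ring
          have e2 : ((i : Int) + 1 + ((t + 1 : Nat) : Int)) = (((i + 1 + 1 + t : Nat)) : Int) := by
            push_cast; ring
          rw [e2] at h2
          rw [e1, PySem.List.pyGetD_natCast, List.getD_eq_getElem?_getD]
          rw [PySem.List.pyGetD_natCast, List.getD_eq_getElem?_getD] at h2
          rw [List.getElem?_set_ne (by omega)]
          exact h2
      rw [hset, hcast, hrec, clearFrom_shift]
      congr 2
      omega

-- run of ones of length T starting at bit 0: m ^ (m+1) = 2^(T+1) - 1
theorem xor_run (m T : Nat) (h1 : ∀ k, k < T → m.testBit k = true) (h2 : m.testBit T = false) :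
    m ^^^ (m + 1) = 2 ^ (T + 1) - 1 := by
  have hqe : m / 2 ^ T % 2 = 0 := by
    rw [Nat.testBit_eq_decide_div_mod_eq] at h2
    have h2' : ¬ (m / 2 ^ T % 2 = 1) := by simpa using h2
    omega
  have hmod : m % 2 ^ T = 2 ^ T - 1 := by
    apply Nat.eq_of_testBit_eq
    intro k
    rw [Nat.testBit_mod_two_pow, Nat.testBit_two_pow_sub_one]
    by_cases hk : k < T
    · simp [hk, h1 k hk]
    · simp [hk]
  have hpos : 0 < 2 ^ T := Nat.two_pow_pos T
  have hm1 : m + 1 = 2 ^ T * (m / 2 ^ T + 1) := by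
    have hdm := Nat.div_add_mod m (2 ^ T)
    rw [Nat.mul_succ]
    omega
  apply Nat.eq_of_testBit_eq
  intro k
  rw [Nat.testBit_xor, Nat.testBit_two_pow_sub_one]
  rcases lt_trichotomy k T with hk | heq | hk
  · have hb1 : (m + 1).testBit k = false := by
      rw [Nat.testBit_eq_decide_div_mod_eq]
      have hdiv : (m + 1) / 2 ^ k = 2 ^ (T - k) * (m / 2 ^ T + 1) := by
        rw [hm1, show (2 : Nat) ^ T = 2 ^ k * 2 ^ (T - k) by rw [← pow_add]; congr 1; omega,
          Nat.mul_assoc, Nat.mul_div_cancel_left _ (Nat.two_pow_pos k)]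
      have heven : (m + 1) / 2 ^ k % 2 = 0 := by
        rw [hdiv, show (2 : Nat) ^ (T - k) = 2 * 2 ^ (T - k - 1) by
          rw [← pow_succ']; congr 1; omega, Nat.mul_assoc]
        exact Nat.mul_mod_right 2 _
      simp [heven]
    have hlt : k < T + 1 := by omega
    rw [h1 k hk, hb1]
    simp [hlt]
  · rw [heq]
    have hb1 : (m + 1).testBit T = true := by
      rw [Nat.testBit_eq_decide_div_mod_eq, hm1, Nat.mul_div_cancel_left _ hpos]
      simp
      omega
    rw [h2, hb1]
    simp
  · obtain ⟨s, rfl⟩ : ∃ s, k = T + 1 + s := ⟨k - T - 1, by omega⟩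
    have key : m.testBit (T + 1 + s) = (m + 1).testBit (T + 1 + s) := by
      rw [Nat.testBit_eq_decide_div_mod_eq, Nat.testBit_eq_decide_div_mod_eq]
      have e1 : m / 2 ^ (T + 1 + s) = m / 2 ^ T / 2 / 2 ^ s := by
        rw [show (2 : Nat) ^ (T + 1 + s) = 2 ^ T * 2 * 2 ^ s by ring,
          ← Nat.div_div_eq_div_mul, ← Nat.div_div_eq_div_mul]
      have e2 : (m + 1) / 2 ^ (T + 1 + s) = (m / 2 ^ T + 1) / 2 / 2 ^ s := by
        rw [hm1, show (2 : Nat) ^ (T + 1 + s) = 2 ^ T * (2 * 2 ^ s) by ring,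
          ← Nat.div_div_eq_div_mul, Nat.mul_div_cancel_left _ hpos, Nat.div_div_eq_div_mul]
      have e3 : (m / 2 ^ T + 1) / 2 = m / 2 ^ T / 2 := by omega
      rw [e1, e2, e3]
    rw [key]
    simp [show ¬ (T + 1 + s) < T + 1 by omega]

theorem bitLength_pow_sub_one (T : Nat) :
    PySem.Int.bitLength ((2 ^ (T + 1) - 1 : Nat) : Int) = T + 1 := by
  have hpos : (1 : Nat) ≤ 2 ^ (T + 1) := Nat.one_le_two_pow
  set b := PySem.Int.bitLength ((2 ^ (T + 1) - 1 : Nat) : Int) with hb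
  have h1 := PySem.Int.lt_two_pow_bitLength ((2 ^ (T + 1) - 1 : Nat) : Int)
  rw [Int.natAbs_natCast] at h1
  have hub : 2 ^ T ≤ 2 ^ (T + 1) - 1 := by
    have : 2 ^ (T + 1) = 2 * 2 ^ T := by rw [pow_succ]; ring
    have := Nat.one_le_two_pow (n := T)
    omega
  have hTb : T < b := by
    have : 2 ^ T < 2 ^ b := lt_of_le_of_lt hub h1
    exact (Nat.pow_lt_pow_iff_right (by omega)).mp this
  have hz : ((2 ^ (T + 1) - 1 : Nat) : Int) ≠ 0 := by
    have h2T : 2 ^ (T + 1) = 2 * 2 ^ T := by rw [pow_succ]; ring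
    have h1T := Nat.one_le_two_pow (n := T)
    exact Nat.cast_ne_zero.mpr (by omega)
  have h2 := PySem.Int.two_pow_bitLength_le _ hz
  rw [Int.natAbs_natCast] at h2
  have hbT : b - 1 < T + 1 := by
    have : 2 ^ (b - 1) < 2 ^ (T + 1) := lt_of_le_of_lt h2 (by omega)
    exact (Nat.pow_lt_pow_iff_right (by omega)).mp this
  omega

theorem sum_bitL (B : Nat) : ∀ n : Nat, n < 2 ^ B →
    (((List.range B).map fun k => if n.testBit k then (1 : Int) else 0).sum
      = (PySem.Int.bitCount (n : Int) : Int)) := by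
  induction B with
  | zero =>
      intro n hn
      have : n = 0 := by simpa using hn
      subst this
      simp [PySem.Int.bitCount_zero]
  | succ B ih =>
      intro n hn
      rcases Nat.eq_zero_or_pos n with rfl | hpos
      · simp [Nat.zero_testBit, PySem.Int.bitCount_zero, List.map_const']
      · rw [List.range_succ_eq_map, List.map_cons, List.map_map, List.sum_cons]
        have hhalf : n / 2 < 2 ^ B := by
          have : 2 ^ (B + 1) = 2 * 2 ^ B := by rw [pow_succ]; ring
          omega
        have hinner : ((List.range B).map ((fun k => if n.testBit k then (1 : Int) else 0) ∘ Nat.succ)).sum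
            = (PySem.Int.bitCount ((n / 2 : Nat) : Int) : Int) := by
          rw [← ih (n / 2) hhalf]
          congr 1
          apply List.map_congr_left
          intro k _
          simp [Function.comp, Nat.testBit_succ]
        rw [hinner, PySem.Int.bitCount_natCast hpos]
        have h0 : n.testBit 0 = decide (n % 2 = 1) := Nat.testBit_zero n
        rcases Nat.mod_two_eq_zero_or_one n with h | h <;> simp [h0, h] <;> push_cast <;> ring

theorem and_mask_mod (n k : Nat) : n &&& (2 ^ k - 1) = n % 2 ^ k := by
  apply Nat.eq_of_testBit_eq
  intro j
  rw [Nat.testBit_and, Nat.testBit_mod_two_pow, Nat.testBit_two_pow_sub_one]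
  by_cases h : j < k <;> simp [h]

theorem bitCount_split (k : Nat) : ∀ n : Nat,
    PySem.Int.bitCount (n : Int)
      = PySem.Int.bitCount ((n >>> k : Nat) : Int)
        + PySem.Int.bitCount ((n % 2 ^ k : Nat) : Int) := by
  induction k with
  | zero => intro n; simp [PySem.Int.bitCount_zero]
  | succ k ih =>
      intro n
      rcases Nat.eq_zero_or_pos n with rfl | hpos
      · simp [PySem.Int.bitCount_zero]
      · have hm2 : n % 2 ^ (k + 1) % 2 = n % 2 := by
          have h2 : (2 : Nat) ∣ 2 ^ (k + 1) := dvd_pow_self 2 (Nat.succ_ne_zero k)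
          exact Nat.mod_mod_of_dvd n h2
        have hdiv : n % 2 ^ (k + 1) / 2 = (n / 2) % 2 ^ k := by
          rw [show (2 : Nat) ^ (k + 1) = 2 * 2 ^ k by rw [pow_succ']]
          exact Nat.mod_mul_right_div_self n 2 (2 ^ k)
        have hshift : n >>> (k + 1) = (n / 2) >>> k := by
          rw [Nat.shiftRight_eq_div_pow, Nat.shiftRight_eq_div_pow,
            show (2 : Nat) ^ (k + 1) = 2 * 2 ^ k by rw [pow_succ'], ← Nat.div_div_eq_div_mul]
        have hlow : PySem.Int.bitCount ((n % 2 ^ (k + 1) : Nat) : Int)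
            = n % 2 + PySem.Int.bitCount (((n / 2) % 2 ^ k : Nat) : Int) := by
          rcases Nat.eq_zero_or_pos (n % 2 ^ (k + 1)) with hz | hp
          · have h1 : n % 2 = 0 := by omega
            have h2 : (n / 2) % 2 ^ k = 0 := by omega
            rw [hz, h1, h2]
            simp [PySem.Int.bitCount_zero]
          · rw [PySem.Int.bitCount_natCast hp, hm2, hdiv]
        rw [PySem.Int.bitCount_natCast hpos, hlow, hshift, ih (n / 2)]
        omega

theorem popDC_eq (f : Nat) : ∀ n : Nat, n < 2 ^ 2 ^ f →
    popDC f n = PySem.Int.bitCount (n : Int) := by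
  induction f with
  | zero =>
      intro n hn
      interval_cases n
      · simp [popDC, PySem.Int.bitCount_zero]
      · rw [popDC]
        decide
  | succ f ih =>
      intro n hn
      rw [popDC]
      by_cases h1 : n ≤ 1
      · interval_cases n
        · simp [PySem.Int.bitCount_zero]
        · rw [if_pos (by omega)]
          decide
      · rw [if_neg h1]
        have hn0 : n ≠ 0 := by omega
        set b := n.log2 + 1 with hbdef
        set k := b / 2 with hkdef
        have hlb : n < 2 ^ b := (Nat.log2_lt hn0).mp (by omega)
        have hble : b ≤ 2 ^ (f + 1) := by
          have : n.log2 < 2 ^ (f + 1) := (Nat.log2_lt hn0).mpr hn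
          omega
        have hp : (0 : Nat) < 2 ^ k := Nat.two_pow_pos k
        have hk2f : k ≤ 2 ^ f ∧ b - k ≤ 2 ^ f := by
          have h2 : (2 : Nat) ^ (f + 1) = 2 * 2 ^ f := by rw [pow_succ']
          omega
        have hhigh : n >>> k < 2 ^ 2 ^ f := by
          rw [Nat.shiftRight_eq_div_pow]
          have hlt : n / 2 ^ k < 2 ^ (b - k) := by
            rw [Nat.div_lt_iff_lt_mul hp, ← pow_add]
            rw [show b - k + k = b by omega]
            exact hlb
          exact lt_of_lt_of_le hlt (Nat.pow_le_pow_right (by omega) hk2f.2)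
        have hlow : n &&& ((1 <<< k) - 1) < 2 ^ 2 ^ f := by
          rw [Nat.one_shiftLeft, and_mask_mod]
          exact lt_of_lt_of_le (Nat.mod_lt n hp) (Nat.pow_le_pow_right (by omega) hk2f.1)
        rw [ih _ hhigh, ih _ hlow, Nat.one_shiftLeft, and_mask_mod]
        exact (bitCount_split k n).symm

theorem popDC_fuel (n : Nat) : n < 2 ^ 2 ^ (n.log2 + 1) := by
  rcases Nat.eq_zero_or_pos n with rfl | hpos
  · exact Nat.two_pow_pos _
  · have h1 : n < 2 ^ (n.log2 + 1) := (Nat.log2_lt (by omega)).mp (by omega)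
    have h2 : n.log2 + 1 ≤ 2 ^ (n.log2 + 1) := (Nat.lt_two_pow_self).le
    exact lt_of_lt_of_le h1 (Nat.pow_le_pow_right (by omega) h2)

-- the Int-level bit operations of B's port, reduced to Nat
theorem shr_natCast (n k : Nat) : ((n : Int) >>> k) = ((n >>> k : Nat) : Int) :=
  Int.natCast_shiftRight n k

theorem testBit_high_or (n j i k : Nat) :
    (((n >>> j) <<< j) ||| (n &&& (2 ^ i - 1))).testBit k
      = ((decide (j ≤ k) && n.testBit k) || (n.testBit k && decide (k < i))) := by
  rw [Nat.testBit_or, Nat.testBit_and, Nat.testBit_shiftLeft, Nat.testBit_two_pow_sub_one]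
  by_cases hj : j ≤ k
  · rw [Nat.testBit_shiftRight, show j + (k - j) = k by omega]
  · simp [hj, ge_iff_le]

theorem step_inv (n : Nat) (hg : GoodN n) (x : Int) (h0 : 0 ≤ x) (hN : x ≤ 10 ^ 6)
    (hfree : n.testBit x.toNat = true →
      ∃ j, x.toNat ≤ j ∧ j ≤ 10 ^ 6 ∧ n.testBit j = false) :
    ∃ n' : Nat, GoodN n' ∧ (∀ k, n'.testBit k = true → n.testBit k = true ∨ k = x.toNat) ∧
      eatStepB (n : Int) x = (n' : Int) ∧ eatStep (bitL n) x = bitL n' := by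
  obtain ⟨i, rfl⟩ : ∃ i : Nat, x = (i : Int) := ⟨x.toNat, (Int.toNat_of_nonneg h0).symm⟩
  have hiN : i ≤ 10 ^ 6 := by exact_mod_cast hN
  have htn : ((i : Int)).toNat = i := Int.toNat_natCast i
  rw [htn] at hfree
  have hread : PySem.List.pyGetD (bitL n) ((i : Int)) 0 = if n.testBit i then 1 else 0 := by
    rw [PySem.List.pyGetD_natCast, List.getD_eq_getElem?_getD, getElem?_bitL,
      if_pos (show i < 10 ^ 6 + 1 by omega)]
    rfl
  have hcond : (PySem.Int.band ((n : Int) >>> i) 1 = 0) ↔ (n.testBit i = false) := by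
    rw [shr_natCast, show (1 : Int) = ((1 : Nat) : Int) from rfl, PySem.Int.band_natCast,
      Nat.cast_eq_zero, Nat.and_one_is_mod, Nat.shiftRight_eq_div_pow,
      Nat.testBit_eq_decide_div_mod_eq]
    constructor <;> intro h <;> simp at h ⊢ <;> omega
  by_cases hb : n.testBit i
  · -- collision branch: the run of ones starting at bit i collapses to its top bit
    obtain ⟨jf, hjf1, hjf2, hjf3⟩ := hfree hb
    have hex : ∃ k, n.testBit (i + k) = false := by
      refine ⟨jf - i, ?_⟩
      rw [show i + (jf - i) = jf by omega]
      exact hjf3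
    set T := Nat.find hex with hT
    have htop : n.testBit (i + T) = false := Nat.find_spec hex
    have hT0 : 0 < T := by
      rcases Nat.eq_zero_or_pos T with h | h
      · rw [h] at htop; simp at htop; rw [htop] at hb; exact absurd hb (by simp)
      · exact h
    have hrun : ∀ k, k < T → n.testBit (i + k) = true := by
      intro k hk
      have := Nat.find_min hex hk
      simpa using this
    have hTle : i + T ≤ 10 ^ 6 := by
      have hTj : T ≤ jf - i := Nat.find_min' hex (by
        rw [show i + (jf - i) = jf by omega]; exact hjf3)
      omega
    set j := i + (T - 1) with hj
    set n' := ((n >>> j) <<< j) ||| (n &&& (2 ^ i - 1)) with hn'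
    have hbits : ∀ k, n'.testBit k
        = ((decide (j ≤ k) && n.testBit k) || (n.testBit k && decide (k < i))) := by
      intro k
      rw [hn']
      exact testBit_high_or n j i k
    refine ⟨n', ?_, ?_, ?_, ?_⟩
    · -- GoodN n'
      intro k hk
      rw [hbits k] at hk
      rcases Bool.or_eq_true_iff.mp hk with h | h
      · exact hg k (Bool.and_eq_true_iff.mp h).2
      · exact hg k (Bool.and_eq_true_iff.mp h).1
    · -- membership: no new bit positions
      intro k hk
      rw [hbits k] at hk
      rcases Bool.or_eq_true_iff.mp hk with h | h
      · exact Or.inl (Bool.and_eq_true_iff.mp h).2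
      · exact Or.inl (Bool.and_eq_true_iff.mp h).1
    · -- B's step computes n'
      simp only [eatStepB]
      rw [if_neg (by omega)]
      simp only [Int.toNat_natCast]
      rw [if_neg (by rw [hcond]; simp [hb])]
      have hxor : PySem.Int.bxor ((n : Int) >>> i) (((n : Int) >>> i) + 1)
          = (((n >>> i) ^^^ ((n >>> i) + 1) : Nat) : Int) := by
        rw [shr_natCast, show (((n >>> i : Nat) : Int) + 1) = (((n >>> i) + 1 : Nat) : Int) by
          push_cast; ring, PySem.Int.bxor_natCast]
      have hrunm : (n >>> i) ^^^ ((n >>> i) + 1) = 2 ^ (T + 1) - 1 := by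
        apply xor_run (n >>> i) T
        · intro k hk
          rw [Nat.testBit_shiftRight]
          exact hrun k hk
        · rw [Nat.testBit_shiftRight]
          exact htop
      rw [hxor, hrunm, bitLength_pow_sub_one]
      have hmask : ((1 <<< i : Nat) : Int) - 1 = ((2 ^ i - 1 : Nat) : Int) := by
        rw [Nat.one_shiftLeft, Nat.cast_sub Nat.one_le_two_pow, Nat.cast_one]
      rw [show T + 1 - 1 = T from rfl, hmask, shr_natCast, ← Int.natCast_shiftLeft,
        PySem.Int.band_natCast, PySem.Int.bor_natCast, hn', hj]
    · -- A's step produces bitL n'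
      simp only [eatStep]
      rw [if_neg (by rw [hread]; simp [hb]), if_pos (by rw [hread]; simp [hb])]
      have hset : PySem.List.pySetD (bitL n) ((i : Int)) 0 = (bitL n).set i 0 := by simp
      have hloop : eatLoop (10 ^ 6 + 1) ((bitL n).set i 0) ((i : Int))
          = (clearFrom ((bitL n).set i 0) i (T - 1), ((i + (T - 1) : Nat) : Int)) := by
        apply loop_spec (T - 1) (10 ^ 6 + 1) ((bitL n).set i 0) i (by omega)
        · intro k hk
          have e : ((i : Int) + 1 + (k : Int)) = ((i + 1 + k : Nat) : Int) := by push_cast; ring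
          rw [e, PySem.List.pyGetD_natCast, List.getD_eq_getElem?_getD,
            List.getElem?_set_ne (by omega), getElem?_bitL]
          have hbit : n.testBit (i + 1 + k) = true := by
            have := hrun (k + 1) (by omega)
            simpa [Nat.add_assoc, Nat.add_comm 1 k] using this
          rw [hbit, if_pos (show i + 1 + k < 10 ^ 6 + 1 by omega)]
          simp
        · have e : ((i : Int) + 1 + ((T - 1 : Nat) : Int)) = ((i + T : Nat) : Int) := by
            rw [Nat.cast_sub (by omega : 1 ≤ T)]
            push_cast
            ring
          rw [e, PySem.List.pyGetD_natCast, List.getD_eq_getElem?_getD,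
            List.getElem?_set_ne (by omega), getElem?_bitL]
          rw [htop, if_pos (show i + T < 10 ^ 6 + 1 by omega)]
          simp
      rw [hset, hloop]
      dsimp only
      rw [PySem.List.pySetD_natCast]
      -- pointwise equality with bitL n'
      apply List.ext_getElem?
      intro k
      rw [getElem?_set_form, clearFrom_getElem?, clearFrom_length, List.length_set, length_bitL,
        getElem?_set_form, length_bitL, getElem?_bitL, getElem?_bitL]
      by_cases hklt : k < 10 ^ 6 + 1
      · by_cases hkj : i + (T - 1) = k
        · -- k = j: the surviving top bit of the run
          have hbitk : n'.testBit k = true := by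
            rw [hbits k]
            have hd1 : j ≤ k := by omega
            have hnb : n.testBit k = true := by
              rw [← hkj]
              exact hrun (T - 1) (by omega)
            simp [hd1, hnb]
          rw [if_pos ⟨hkj, by omega⟩, if_pos hklt, hbitk]
          simp
        · rw [if_neg (fun h => hkj h.1)]
          by_cases hrange : i ≤ k ∧ k < i + (T - 1)
          · -- inside the cleared run
            have hbitk : n'.testBit k = false := by
              rw [hbits k]
              simp [show ¬ j ≤ k by omega, show ¬ k < i by omega]
            rw [if_pos hrange, if_pos hklt, if_pos hklt, hbitk]
            simp
          · -- untouched positions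
            rw [if_neg hrange]
            have hki : ¬ (i = k ∧ i < 10 ^ 6 + 1) := by omega
            have hbitk : n'.testBit k = n.testBit k := by
              rw [hbits k]
              rcases (show k < i ∨ j < k by omega) with h | h
              · simp [show ¬ j ≤ k by omega, h]
              · simp [show j ≤ k by omega, show ¬ k < i by omega]
            rw [if_neg hki, if_pos hklt, if_pos hklt, hbitk]
      · rw [if_neg (by omega), if_neg (by omega), if_neg (by omega), if_neg hklt, if_neg hklt]
  · -- fresh bit: just set it
    have hb' : n.testBit i = false := by simpa using hb
    refine ⟨n ||| (1 <<< i), ?_, ?_, ?_, ?_⟩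
    · intro k hk
      rw [Nat.testBit_or, Nat.one_shiftLeft, Nat.testBit_two_pow] at hk
      rcases Bool.or_eq_true_iff.mp hk with h | h
      · exact hg k h
      · have : i = k := by simpa using h
        omega
    · intro k hk
      rw [Nat.testBit_or, Nat.one_shiftLeft, Nat.testBit_two_pow] at hk
      rcases Bool.or_eq_true_iff.mp hk with h | h
      · exact Or.inl h
      · have : i = k := by simpa using h
        exact Or.inr this.symm
    · simp only [eatStepB]
      rw [if_neg (by omega)]
      simp only [Int.toNat_natCast]
      rw [if_pos (by rw [hcond]; exact hb'), PySem.Int.bor_natCast]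
    · simp only [eatStep]
      rw [if_pos (by rw [hread]; simp [hb'])]
      rw [hread]
      have hset : PySem.List.pySetD (bitL n) ((i : Int)) ((if n.testBit i then (1 : Int) else 0) + 1)
          = (bitL n).set i 1 := by
        simp [hb']
      rw [hset]
      apply List.ext_getElem?
      intro k
      rw [getElem?_set_form, length_bitL, getElem?_bitL, getElem?_bitL]
      by_cases hklt : k < 10 ^ 6 + 1
      · by_cases hik : i = k
        · rw [if_pos ⟨hik, by omega⟩, if_pos hklt]
          have hbitk : (n ||| 1 <<< i).testBit k = true := by
            rw [Nat.testBit_or, Nat.one_shiftLeft, Nat.testBit_two_pow, hik]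
            simp
          rw [hbitk]
          simp
        · rw [if_neg (fun h => hik h.1), if_pos hklt, if_pos hklt]
          have hbitk : (n ||| 1 <<< i).testBit k = n.testBit k := by
            rw [Nat.testBit_or, Nat.one_shiftLeft, Nat.testBit_two_pow]
            simp [hik]
          rw [hbitk]
      · rw [if_neg (by omega), if_neg hklt, if_neg hklt]

-- all of [i, 10^6] occurring in w (whose values are ≤ 10^6) forces the dedup-count equality
theorem chainTop_count (w : List Int) (hle : ∀ y ∈ w, y ≤ 10 ^ 6) (i : Int) (hi : i ≤ 10 ^ 6)
    (hch : ∀ j : Int, i ≤ j → j ≤ 10 ^ 6 → j ∈ w) :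
    (((w.filter (fun y => decide (i ≤ y))).dedup.length : Int) = 10 ^ 6 + 1 - i) := by
  have hnd : (w.filter (fun y => decide (i ≤ y))).dedup.Nodup := List.nodup_dedup _
  have hfin : (w.filter (fun y => decide (i ≤ y))).dedup.toFinset = Finset.Icc i (10 ^ 6) := by
    ext y
    simp only [List.mem_toFinset, List.mem_dedup, List.mem_filter, decide_eq_true_eq,
      Finset.mem_Icc]
    constructor
    · rintro ⟨hyw, hy⟩
      exact ⟨hy, hle y hyw⟩
    · rintro ⟨h1, h2⟩
      exact ⟨hch y h1 h2, h1⟩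
  have hcard : (w.filter (fun y => decide (i ≤ y))).dedup.length
      = (Finset.Icc i ((10 : Int) ^ 6)).card := by
    rw [← hfin, List.toFinset_card_of_nodup hnd]
  rw [hcard, Int.card_Icc, Int.toNat_of_nonneg (by omega)]

theorem fold_inv (w : List Int) (hw : ∀ x ∈ w, 0 ≤ x ∧ x ≤ 10 ^ 6)
    (hbad : ¬ ∃ i ∈ w, 2 ≤ w.count i ∧
      (((w.filter (fun y => decide (i ≤ y))).dedup.length : Int) = 10 ^ 6 + 1 - i)) :
    ∀ (suf pre : List Int), w = pre ++ suf → ∀ (n : Nat), GoodN n →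
    (∀ k, n.testBit k = true → ((k : Nat) : Int) ∈ pre) →
    ∃ n' : Nat, GoodN n' ∧ suf.foldl eatStepB (n : Int) = (n' : Int) ∧
      suf.foldl eatStep (bitL n) = bitL n' := by
  intro suf
  induction suf with
  | nil => intro pre _ n hg _; exact ⟨n, hg, by simp, by simp⟩
  | cons x xs ih =>
      intro pre hsplit n hg hmem
      have hxw : x ∈ w := by rw [hsplit]; simp
      obtain ⟨hx0, hxN⟩ := hw x hxw
      have hfree : n.testBit x.toNat = true →
          ∃ j, x.toNat ≤ j ∧ j ≤ 10 ^ 6 ∧ n.testBit j = false := by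
        intro hbit
        by_contra hno
        push_neg at hno
        have hall : ∀ j, x.toNat ≤ j → j ≤ 10 ^ 6 → n.testBit j = true := by
          intro j h1 h2
          have := hno j h1 h2
          simpa using this
        apply hbad
        refine ⟨x, hxw, ?_, ?_⟩
        · -- x occurs at least twice: once in pre (its bit is set), once here
          have hxpre : x ∈ pre := by
            have := hmem x.toNat hbit
            rwa [Int.toNat_of_nonneg hx0] at this
          have h1 : 1 ≤ pre.count x := List.one_le_count_iff.mpr hxpre
          have h2 : w.count x = pre.count x + (x :: xs).count x := by
            rw [hsplit, List.count_append]
          have h3 : 1 ≤ (x :: xs).count x := List.one_le_count_iff.mpr (by simp)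
          omega
        · -- every value in [x, 10^6] occurs in w
          apply chainTop_count w (fun y hy => (hw y hy).2) x hxN
          intro j h1 h2
          have hj0 : 0 ≤ j := le_trans hx0 h1
          have hjt : x.toNat ≤ j.toNat := by omega
          have hjt2 : j.toNat ≤ 10 ^ 6 := by omega
          have hbj := hall j.toNat hjt hjt2
          have := hmem j.toNat hbj
          rw [Int.toNat_of_nonneg hj0] at this
          rw [hsplit]
          exact List.mem_append_left _ this
      obtain ⟨n1, hg1, hmem1, hB1, hA1⟩ := step_inv n hg x hx0 hxN hfree
      have hmem1' : ∀ k, n1.testBit k = true → ((k : Nat) : Int) ∈ pre ++ [x] := by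
        intro k hk
        rcases hmem1 k hk with h | h
        · exact List.mem_append_left _ (hmem k h)
        · rw [h, Int.toNat_of_nonneg hx0]
          simp
      obtain ⟨n', hg', hB', hA'⟩ := ih (pre ++ [x]) (by rw [hsplit]; simp) n1 hg1 hmem1'
      exact ⟨n', hg', by simpa [hB1] using hB', by simpa [hA1] using hA'⟩

theorem bitL_zero : bitL 0 = List.replicate (10 ^ 6 + 1) 0 := by
  apply List.ext_getElem?
  intro k
  rw [getElem?_bitL, List.getElem?_replicate]
  simp [Nat.zero_testBit]

theorem goodN_lt (n : Nat) (hg : GoodN n) : n < 2 ^ (10 ^ 6 + 1) := by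
  by_contra hlt
  obtain ⟨i, hi, hbit⟩ := Nat.exists_ge_and_testBit_of_ge_two_pow (by omega : 2 ^ (10 ^ 6 + 1) ≤ n)
  have := hg i hbit
  omega

-- ===== VERDICT (by name: the statement is the Claim_ definition above) =====
theorem eatsuger_spec : Claim_equal_eatsuger := by
  intro w _ hpre
  unfold Spec_eatsuger eatsuger eatsuger_alt
  obtain ⟨hw, hbad⟩ := hpre
  obtain ⟨n', hg', hB, hA⟩ := fold_inv w hw hbad w [] rfl 0
    (by intro k hk; simp [Nat.zero_testBit] at hk)
    (by intro k hk; simp [Nat.zero_testBit] at hk)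
  rw [← bitL_zero, hA]
  have hB' : List.foldl eatStepB 0 w = ((n' : Nat) : Int) := by
    rw [show (0 : Int) = ((0 : Nat) : Int) from rfl]
    exact hB
  rw [hB', Int.toNat_natCast, popDC_eq _ n' (popDC_fuel n'), ← List.sum_eq_foldl]
  have := sum_bitL (10 ^ 6 + 1) n' (goodN_lt n' hg')
  simpa [bitL] using this
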